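-- pv_equiv track=rewrite | github.com/6210qwe/leetcode_py | leetcode_solutions/by_id/q1929.py | solution_function_name
-- ===== SOURCE A (Python) =====
-- def solution_function_name(n: int, index: int, maxSum: int) -> int:
--     """
--     函数式接口 - 使用二分查找来确定 nums[index] 的最大值。
--     """
--     def get_sum(mid: int) -> int:
--         # 计算以 mid 为峰值的数组总和
--         left_sum = (mid + max(mid - index, 0)) * (min(index, mid) + 1) // 2
--         right_sum = (mid + max(mid - (n - index - 1), 0)) * (min(n - index, mid) + 1) // 2
--         return left_sum + right_sum - mid
--
--     left, right = 1, maxSum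
--     while left < right:
--         mid = (left + right + 1) // 2
--         if get_sum(mid) <= maxSum:
--             left = mid
--         else:
--             right = mid - 1
--
--     return left
-- ===== SOURCE B (Python) =====
-- from math import isqrt
--
--
-- def solution_function_name(n: int, index: int, maxSum: int) -> int:
--     """Closed-form: solve the pyramid-sum inequality piecewise (isqrt for the
--     quadratic pieces, division for the linear piece) and correct by O(1) steps."""
--
--     def get_sum(v: int) -> int:
--         left_sum = (v + max(v - index, 0)) * (min(index, v) + 1) // 2
--         right_sum = (v + max(v - (n - index - 1), 0)) * (min(n - index, v) + 1) // 2
--         return left_sum + right_sum - v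
--
--     M = maxSum
--     if M <= 1:
--         return 1
--     if get_sum(M) <= M:
--         return M
--
--     # Estimate: largest v with Q(v) = alpha*v^2 + beta*v + gamma <= 2*M, where Q
--     # approximates 2*get_sum(v) exactly up to floor-division parity, piecewise.
--     m2 = n - index  # right "min" bound; left uses index itself
--
--     def best_in_piece(alpha: int, beta: int, gamma: int, lo: int, hi: int) -> int:
--         # largest v in [lo, hi] with alpha*v^2 + beta*v + gamma <= 2*M, else 0
--         if lo > hi:
--             return 0
--         if alpha == 0:
--             if beta <= 0:
--                 return hi if beta * hi + gamma <= 2 * M else 0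
--             v = (2 * M - gamma) // beta
--         else:
--             disc = beta * beta - 4 * alpha * (gamma - 2 * M)
--             if disc < 0:
--                 return 0
--             v = (isqrt(disc) - beta) // (2 * alpha)
--         if v < lo:
--             return 0
--         return min(v, hi)
--
--     # left term doubled: v*(v+1) for v <= index, else (2v-index)*(index+1)
--     # right term doubled: v*(v+1) for v <= m2-1, else (2v-m2+1)*(m2+1)
--     bL = max(index, 1)       # left term quadratic on [1, bL], linear on [bL, inf)
--     bR = max(m2 - 1, 1)      # right term quadratic on [1, bR], linear on [bR, inf)
--     lo1, hi1 = min(bL, bR), max(bL, bR)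
--     est = 0
--     # piece 1: both quadratic: 2v^2 + 2v - 2v = 2v^2
--     est = max(est, best_in_piece(2, 0, 0, 1, lo1))
--     # piece 2: one quadratic, one linear
--     if bL <= bR:
--         est = max(est, best_in_piece(1, 1 + 2 * (index + 1) - 2,
--                                      -index * (index + 1), lo1, hi1))
--     else:
--         est = max(est, best_in_piece(1, 1 + 2 * (m2 + 1) - 2,
--                                      -(m2 - 1) * (m2 + 1), lo1, hi1))
--     # piece 3: both linear, slope 2n - 2
--     est = max(est, best_in_piece(0, 2 * (index + 1) + 2 * (m2 + 1) - 2,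
--                                  -index * (index + 1) - (m2 - 1) * (m2 + 1),
--                                  hi1, M))
--     v = min(max(est, 1), M)
--     while v < M and get_sum(v + 1) <= M:
--         v += 1
--     while v > 1 and get_sum(v) > M:
--         v -= 1
--     return v
-- ===== Notes on version B (the rewrite author's own statement) =====
-- stated objective: faster
-- what changed: Replaces the O(log maxSum) binary search over candidate peak values by a closed-form solve of the piecewise-quadratic pyramid-sum inequality (isqrt for the quadratic pieces, division for the linear piece) followed by an O(1) one-step correction against the exact integer sum.
import Mathlib
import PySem

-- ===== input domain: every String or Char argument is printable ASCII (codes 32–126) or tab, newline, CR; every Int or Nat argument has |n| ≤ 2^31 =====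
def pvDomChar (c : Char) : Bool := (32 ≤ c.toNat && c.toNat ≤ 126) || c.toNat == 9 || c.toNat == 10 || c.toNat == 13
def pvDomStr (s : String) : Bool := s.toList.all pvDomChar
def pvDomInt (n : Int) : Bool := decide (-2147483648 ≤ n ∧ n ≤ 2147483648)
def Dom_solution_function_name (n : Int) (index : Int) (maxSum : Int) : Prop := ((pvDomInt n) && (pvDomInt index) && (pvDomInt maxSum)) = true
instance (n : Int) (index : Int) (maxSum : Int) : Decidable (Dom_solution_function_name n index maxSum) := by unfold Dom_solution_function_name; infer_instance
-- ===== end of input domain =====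

-- B replaces A's binary search by a closed-form piecewise solve (isqrt/division) plus an O(1) correction (objective: faster, O(log maxSum) -> O(1) calls to get_sum).

-- ===== PORT A =====
def pvA_getSum (n : Int) (index : Int) (mid : Int) : Int :=
  let left_sum := PySem.Int.floordiv ((mid + max (mid - index) 0) * (min index mid + 1)) 2
  let right_sum := PySem.Int.floordiv ((mid + max (mid - (n - index - 1)) 0) * (min (n - index) mid + 1)) 2
  left_sum + right_sum - mid

-- fuel-based totality guard: each iteration shrinks right - left by at least 1,
-- so (maxSum - 1).toNat steps always suffice for the Python while-loop
def pvA_loop (n : Int) (index : Int) (maxSum : Int) : Nat → Int → Int → Int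
  | 0, left, _ => left
  | fuel + 1, left, right =>
    if left < right then
      if pvA_getSum n index (PySem.Int.floordiv (left + right + 1) 2) ≤ maxSum then
        pvA_loop n index maxSum fuel (PySem.Int.floordiv (left + right + 1) 2) right
      else pvA_loop n index maxSum fuel left (PySem.Int.floordiv (left + right + 1) 2 - 1)
    else left

def solution_function_name (n : Int) (index : Int) (maxSum : Int) : Int :=
  pvA_loop n index maxSum (maxSum - 1).toNat 1 maxSum

-- ===== PORT B =====
def pvB_getSum (n : Int) (index : Int) (v : Int) : Int :=
  let left_sum := PySem.Int.floordiv ((v + max (v - index) 0) * (min index v + 1)) 2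
  let right_sum := PySem.Int.floordiv ((v + max (v - (n - index - 1)) 0) * (min (n - index) v + 1)) 2
  left_sum + right_sum - v

-- math.isqrt; exact on the nonnegative arguments B feeds it (guarded by disc ≥ 0)
def pvIsqrt (x : Int) : Int := Int.ofNat (Nat.sqrt x.toNat)

def pvB_bestInPiece (M : Int) (alpha : Int) (beta : Int) (gamma : Int) (lo : Int) (hi : Int) : Int :=
  if lo > hi then 0
  else if alpha = 0 then
    if beta ≤ 0 then (if beta * hi + gamma ≤ 2 * M then hi else 0)
    else
      let v := PySem.Int.floordiv (2 * M - gamma) beta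
      if v < lo then 0 else min v hi
  else
    let disc := beta * beta - 4 * alpha * (gamma - 2 * M)
    if disc < 0 then 0
    else
      let v := PySem.Int.floordiv (pvIsqrt disc - beta) (2 * alpha)
      if v < lo then 0 else min v hi

-- fuel-based totality guards for the two correction loops (each step moves v by 1)
def pvB_up (n : Int) (index : Int) (M : Int) : Nat → Int → Int
  | 0, v => v
  | fuel + 1, v =>
    if v < M ∧ pvB_getSum n index (v + 1) ≤ M then pvB_up n index M fuel (v + 1) else v

def pvB_down (n : Int) (index : Int) (M : Int) : Nat → Int → Int
  | 0, v => v
  | fuel + 1, v =>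
    if 1 < v ∧ M < pvB_getSum n index v then pvB_down n index M fuel (v - 1) else v

def solution_function_name_alt (n : Int) (index : Int) (maxSum : Int) : Int :=
  if maxSum ≤ 1 then 1
  else if pvB_getSum n index maxSum ≤ maxSum then maxSum
  else
    let m2 := n - index
    let bL := max index 1
    let bR := max (m2 - 1) 1
    let lo1 := min bL bR
    let hi1 := max bL bR
    let e1 := max 0 (pvB_bestInPiece maxSum 2 0 0 1 lo1)
    let e2 := max e1 (if bL ≤ bR then
        pvB_bestInPiece maxSum 1 (1 + 2 * (index + 1) - 2) (-index * (index + 1)) lo1 hi1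
      else
        pvB_bestInPiece maxSum 1 (1 + 2 * (m2 + 1) - 2) (-(m2 - 1) * (m2 + 1)) lo1 hi1)
    let est := max e2 (pvB_bestInPiece maxSum 0 (2 * (index + 1) + 2 * (m2 + 1) - 2)
        (-index * (index + 1) - (m2 - 1) * (m2 + 1)) hi1 maxSum)
    let v := min (max est 1) maxSum
    let u := pvB_up n index maxSum (maxSum - v).toNat v
    pvB_down n index maxSum (u - 1).toNat u

-- ===== PRECONDITION & SPEC =====
def Spec_solution_function_name (n : Int) (index : Int) (maxSum : Int) (out : Int) : Prop := out = solution_function_name_alt n index maxSum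
instance (n : Int) (index : Int) (maxSum : Int) (out : Int) : Decidable (Spec_solution_function_name n index maxSum out) := by unfold Spec_solution_function_name; infer_instance

-- ===== CLAIM (what is proved, stated in full; the proofs are below) =====
def Claim_equal_solution_function_name : Prop := ∀ (n : Int) (index : Int) (maxSum : Int), Dom_solution_function_name n index maxSum → Spec_solution_function_name n index maxSum (solution_function_name n index maxSum)

-- ===== LEMMAS AND PROOFS =====

-- floor-division-by-2 bridge and facts
theorem pv_fd2 (x : Int) : PySem.Int.floordiv x 2 = x / 2 :=
  PySem.Int.floordiv_eq_ediv_of_pos (by norm_num)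

-- both versions' get_sum are the same arithmetic function
theorem pv_getSum_eq (n index v : Int) : pvB_getSum n index v = pvA_getSum n index v := rfl

-- S on the two branch shapes of each arm
theorem pv_S_shape (n index v : Int) (hL : index ≤ v) (hm : n - index ≤ v) :
    pvA_getSum n index v =
      PySem.Int.floordiv ((2 * v - index) * (index + 1)) 2 +
      PySem.Int.floordiv ((2 * v - (n - index) + 1) * ((n - index) + 1)) 2 - v := by
  simp only [pvA_getSum]
  rw [max_eq_left (by omega), min_eq_left hL, max_eq_left (by omega), min_eq_left hm]
  ring_nf

theorem pv_S_shape_qq (n index v : Int) (hL : v ≤ index) (hm : v ≤ n - index - 1) :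
    pvA_getSum n index v =
      PySem.Int.floordiv (v * (v + 1)) 2 + PySem.Int.floordiv (v * (v + 1)) 2 - v := by
  simp only [pvA_getSum]
  rw [max_eq_right (by omega), min_eq_right hL, max_eq_right (by omega), min_eq_right (by omega)]
  ring_nf

theorem pv_S_shape_ql (n index v : Int) (hL : v ≤ index) (hm : n - index ≤ v) :
    pvA_getSum n index v =
      PySem.Int.floordiv (v * (v + 1)) 2 +
      PySem.Int.floordiv ((2 * v - (n - index) + 1) * ((n - index) + 1)) 2 - v := by
  simp only [pvA_getSum]
  rw [max_eq_right (by omega), min_eq_right hL, max_eq_left (by omega), min_eq_left hm]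
  ring_nf

theorem pv_S_shape_lq (n index v : Int) (hL : index ≤ v) (hm : v ≤ n - index - 1) :
    pvA_getSum n index v =
      PySem.Int.floordiv ((2 * v - index) * (index + 1)) 2 +
      PySem.Int.floordiv (v * (v + 1)) 2 - v := by
  simp only [pvA_getSum]
  rw [max_eq_left (by omega), min_eq_left hL, max_eq_right (by omega), min_eq_right (by omega)]
  ring_nf

-- criteria for the STEP lemma
theorem pv_crit_add (v x y x' y' a b : Int) (hx : x' = x + 2 * a) (hy : y + 2 * b ≤ y')
    (hab : 1 ≤ a + b) :
    PySem.Int.floordiv x 2 + PySem.Int.floordiv y 2 - v ≤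
      PySem.Int.floordiv x' 2 + PySem.Int.floordiv y' 2 - (v + 1) := by
  simp only [pv_fd2]; omega

theorem pv_crit_small (v x y : Int) (h : x + y ≤ 4 * v) :
    PySem.Int.floordiv x 2 + PySem.Int.floordiv y 2 - v ≤ v := by
  simp only [pv_fd2]; omega

-- STEP: moving the peak down by one keeps the sum bounded (monotone step, or already ≤ v)
theorem pv_step (n index v : Int) (hv : 1 ≤ v) :
    pvA_getSum n index v ≤ pvA_getSum n index (v + 1) ∨ pvA_getSum n index v ≤ v := by
  by_cases hL : index ≤ v
  · by_cases hm : n - index ≤ v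
    · -- both arms in the linear regime
      rw [pv_S_shape n index v hL hm, pv_S_shape n index (v + 1) (by omega) (by omega)]
      by_cases hn : -1 ≤ n
      · exact Or.inl (pv_crit_add v _ _ _ _ (index + 1) ((n - index) + 1)
          (by ring) (le_of_eq (by ring)) (by omega))
      · refine Or.inr (pv_crit_small v _ _ ?_)
        by_cases hL1 : index ≤ -1
        · by_cases hm1 : n - index ≤ -1
          · nlinarith [mul_nonpos_of_nonneg_of_nonpos (by omega : (0:Int) ≤ 2 * v - index) (by omega : index + 1 ≤ 0),
              mul_nonpos_of_nonneg_of_nonpos (by omega : (0:Int) ≤ 2 * v - (n - index) + 1) (by omega : (n - index) + 1 ≤ 0)]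
          · nlinarith [mul_nonpos_of_nonneg_of_nonpos (by omega : (0:Int) ≤ 2 * v - index) (by omega : index + 1 ≤ 0),
              sq_nonneg ((n - index) + 1), sq_nonneg (v + (n - index)), sq_nonneg (v - (n - index))]
        · -- index ≥ 0 forces n - index ≤ -2 - index
          nlinarith [mul_nonpos_of_nonneg_of_nonpos (by omega : (0:Int) ≤ 2 * v - (n - index) + 1) (by omega : (n - index) + 1 ≤ 0),
            sq_nonneg (index + 1), sq_nonneg (v + index), sq_nonneg (v - index)]
    · by_cases he : n - index = v + 1
      · -- right arm at its peak boundary: v = (n-index) - 1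
        rw [pv_S_shape_lq n index v hL (by omega), pv_S_shape n index (v + 1) (by omega) (by omega)]
        by_cases hL1 : -v - 2 ≤ index
        · refine Or.inl (pv_crit_add v _ _ _ _ (index + 1) (v + 2) (by ring) ?_ (by omega))
          have hm2 : n - index = v + 1 := by omega
          rw [hm2]; nlinarith
        · refine Or.inr (pv_crit_small v _ _ ?_)
          nlinarith [mul_nonpos_of_nonneg_of_nonpos (by omega : (0:Int) ≤ 2 * v - index) (by omega : index + 1 ≤ 0),
            sq_nonneg (v + 1)]
      · -- right arm quadratic at v and v+1
        rw [pv_S_shape_lq n index v hL (by omega), pv_S_shape_lq n index (v + 1) (by omega) (by omega)]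
        by_cases hL1 : -v - 1 ≤ index
        · exact Or.inl (pv_crit_add v _ _ _ _ (index + 1) (v + 1) (by ring) (le_of_eq (by ring)) (by omega))
        · refine Or.inr (pv_crit_small v _ _ ?_)
          nlinarith [mul_nonpos_of_nonneg_of_nonpos (by omega : (0:Int) ≤ 2 * v - index) (by omega : index + 1 ≤ 0),
            sq_nonneg (v + 1)]
  · -- left arm quadratic at v and v+1 (v + 1 ≤ index)
    by_cases hm : n - index ≤ v
    · rw [pv_S_shape_ql n index v (by omega) hm, pv_S_shape_ql n index (v + 1) (by omega) (by omega)]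
      by_cases hm1 : -v - 1 ≤ n - index
      · exact Or.inl (pv_crit_add v _ _ _ _ (v + 1) ((n - index) + 1) (by ring) (le_of_eq (by ring)) (by omega))
      · refine Or.inr (pv_crit_small v _ _ ?_)
        nlinarith [mul_nonpos_of_nonneg_of_nonpos (by omega : (0:Int) ≤ 2 * v - (n - index) + 1) (by omega : (n - index) + 1 ≤ 0),
          sq_nonneg (v + 1)]
    · by_cases he : n - index = v + 1
      · rw [pv_S_shape_qq n index v (by omega) (by omega), pv_S_shape_ql n index (v + 1) (by omega) (by omega)]
        refine Or.inl (pv_crit_add v _ _ _ _ (v + 1) (v + 2) (by ring) ?_ (by omega))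
        have hm2 : n - index = v + 1 := by omega
        rw [hm2]; nlinarith
      · rw [pv_S_shape_qq n index v (by omega) (by omega), pv_S_shape_qq n index (v + 1) (by omega) (by omega)]
        exact Or.inl (pv_crit_add v _ _ _ _ (v + 1) (v + 1) (by ring) (le_of_eq (by ring)) (by omega))

-- DOWN-CLOSED: if the sum fits at v ≤ M it fits at any 1 ≤ w ≤ v
theorem pv_dc (n index M : Int) (w v : Int) (hw : 1 ≤ w) (hwv : w ≤ v) (hvM : v ≤ M)
    (hS : pvA_getSum n index v ≤ M) : pvA_getSum n index w ≤ M := by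
  have key : ∀ (k : Nat) (u : Int), 1 ≤ u → u + k ≤ M → pvA_getSum n index (u + k) ≤ M →
      pvA_getSum n index u ≤ M := by
    intro k
    induction k with
    | zero => intro u _ _ h; simpa using h
    | succ k ih =>
      intro u hu hkM hSk
      have h1 : pvA_getSum n index (u + 1) ≤ M := by
        have heq : (u + 1) + (k : Int) = u + ((k + 1 : Nat) : Int) := by push_cast; ring
        exact ih (u + 1) (by omega) (by push_cast at hkM ⊢; omega) (by rw [heq]; exact hSk)
      rcases pv_step n index u hu with h | h
      · exact le_trans h h1
      · have : u + ((k : Int) + 1) ≤ M := by push_cast at hkM; omega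
        omega
  have hveq : v = w + ((v - w).toNat : Int) := by omega
  exact key (v - w).toNat w hw (by omega) (by rw [← hveq]; exact hS)

-- the common specification both programs satisfy (for maxSum ≥ 1)
def pvGood (n index M res : Int) : Prop :=
  1 ≤ res ∧ res ≤ M ∧ (pvA_getSum n index res ≤ M ∨ res = 1) ∧
    ∀ w, res < w → w ≤ M → M < pvA_getSum n index w

theorem pv_good_unique (n index M x y : Int) (hx : pvGood n index M x) (hy : pvGood n index M y) :
    x = y := by
  have h1x := hx.1
  have h1y := hy.1
  rcases lt_trichotomy x y with h | h | h
  · exact absurd (hy.2.2.1.resolve_right (by omega)) (not_le.mpr (hx.2.2.2 y h hy.2.1))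
  · exact h
  · exact absurd (hx.2.2.1.resolve_right (by omega)) (not_le.mpr (hy.2.2.2 x h hx.2.1))

theorem pv_loop_good (n index M : Int) :
    ∀ (fuel : Nat) (l r : Int), (r - l).toNat ≤ fuel → 1 ≤ l → l ≤ r → r ≤ M →
      (pvA_getSum n index l ≤ M ∨ l = 1) →
      (∀ w, r < w → w ≤ M → M < pvA_getSum n index w) →
      pvGood n index M (pvA_loop n index M fuel l r) := by
  intro fuel
  induction fuel with
  | zero =>
    intro l r hf h1 hlr hrM hSl hup
    show pvGood n index M l
    exact ⟨h1, by omega, hSl, fun w hw hwM => hup w (by omega) hwM⟩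
  | succ fuel ih =>
    intro l r hf h1 hlr hrM hSl hup
    show pvGood n index M
      (if l < r then
        if pvA_getSum n index (PySem.Int.floordiv (l + r + 1) 2) ≤ M then
          pvA_loop n index M fuel (PySem.Int.floordiv (l + r + 1) 2) r
        else pvA_loop n index M fuel l (PySem.Int.floordiv (l + r + 1) 2 - 1)
      else l)
    by_cases h : l < r
    · rw [if_pos h]
      have hmb : l + 1 ≤ PySem.Int.floordiv (l + r + 1) 2 ∧
          PySem.Int.floordiv (l + r + 1) 2 ≤ r := by rw [pv_fd2]; omega
      set mid := PySem.Int.floordiv (l + r + 1) 2 with hmid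
      by_cases hp : pvA_getSum n index mid ≤ M
      · rw [if_pos hp]
        exact ih mid r (by omega) (by omega) (by omega) hrM (Or.inl hp) hup
      · rw [if_neg hp]
        refine ih l (mid - 1) (by omega) h1 (by omega) (by omega) hSl ?_
        intro w hw hwM
        by_contra hc
        push Not at hc
        exact hp (pv_dc n index M mid w (by omega) (by omega) hwM hc)
    · rw [if_neg h]
      exact ⟨h1, by omega, hSl, fun w hw hwM => hup w (by omega) hwM⟩

theorem pv_up_post (n index M : Int) :
    ∀ (fuel : Nat) (v : Int), (M - v).toNat ≤ fuel → 1 ≤ v → v ≤ M →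
      1 ≤ pvB_up n index M fuel v ∧ pvB_up n index M fuel v ≤ M ∧
        ∀ w, pvB_up n index M fuel v < w → w ≤ M → M < pvA_getSum n index w := by
  intro fuel
  induction fuel with
  | zero =>
    intro v hf h1 hvM
    show 1 ≤ v ∧ v ≤ M ∧ ∀ w, v < w → w ≤ M → M < pvA_getSum n index w
    have hvM' : v = M := by omega
    exact ⟨h1, hvM, fun w hw hwM => by omega⟩
  | succ fuel ih =>
    intro v hf h1 hvM
    show 1 ≤ (if v < M ∧ pvB_getSum n index (v + 1) ≤ M then pvB_up n index M fuel (v + 1) else v) ∧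
      (if v < M ∧ pvB_getSum n index (v + 1) ≤ M then pvB_up n index M fuel (v + 1) else v) ≤ M ∧
      ∀ w,
        (if v < M ∧ pvB_getSum n index (v + 1) ≤ M then pvB_up n index M fuel (v + 1) else v) < w →
          w ≤ M → M < pvA_getSum n index w
    by_cases h : v < M ∧ pvB_getSum n index (v + 1) ≤ M
    · rw [if_pos h]
      exact ih (v + 1) (by omega) (by omega) (by omega)
    · rw [if_neg h]
      refine ⟨h1, hvM, ?_⟩
      intro w hw hwM
      rcases not_and_or.mp h with h' | h'
      · omega
      · by_contra hc
        push Not at hc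
        rw [pv_getSum_eq] at h'
        exact h' (pv_dc n index M (v + 1) w (by omega) (by omega) hwM hc)

theorem pv_down_good (n index M : Int) :
    ∀ (fuel : Nat) (v : Int), (v - 1).toNat ≤ fuel → 1 ≤ v → v ≤ M →
      (∀ w, v < w → w ≤ M → M < pvA_getSum n index w) →
      pvGood n index M (pvB_down n index M fuel v) := by
  intro fuel
  induction fuel with
  | zero =>
    intro v hf h1 hvM hup
    show pvGood n index M v
    exact ⟨h1, hvM, Or.inr (by omega), by
      have hv1 : v = 1 := by omega
      exact fun w hw hwM => hup w (by omega) hwM⟩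
  | succ fuel ih =>
    intro v hf h1 hvM hup
    show pvGood n index M
      (if 1 < v ∧ M < pvB_getSum n index v then pvB_down n index M fuel (v - 1) else v)
    by_cases h : 1 < v ∧ M < pvB_getSum n index v
    · rw [if_pos h]
      refine ih (v - 1) (by omega) (by omega) (by omega) ?_
      intro w hw hwM
      by_cases hwv : w = v
      · rw [hwv]; rw [pv_getSum_eq] at h; exact h.2
      · exact hup w (by omega) hwM
    · rw [if_neg h]
      rw [pv_getSum_eq] at h
      refine ⟨h1, hvM, ?_, hup⟩
      rcases not_and_or.mp h with h' | h'
      · exact Or.inr (by omega)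
      · exact Or.inl (by omega)

theorem pv_main (n index maxSum : Int) :
    solution_function_name n index maxSum = solution_function_name_alt n index maxSum := by
  show pvA_loop n index maxSum (maxSum - 1).toNat 1 maxSum = solution_function_name_alt n index maxSum
  by_cases h1 : maxSum ≤ 1
  · have hA : pvA_loop n index maxSum (maxSum - 1).toNat 1 maxSum = 1 := by
      have hz : (maxSum - 1).toNat = 0 := by omega
      rw [hz]
      rfl
    rw [hA, solution_function_name_alt, if_pos h1]
  · have hA : pvGood n index maxSum (pvA_loop n index maxSum (maxSum - 1).toNat 1 maxSum) :=
      pv_loop_good n index maxSum ((maxSum - 1).toNat) 1 maxSum le_rfl le_rfl (by omega) le_rfl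
        (Or.inr rfl) (fun w hw hwM => absurd hw (by omega))
    rw [solution_function_name_alt, if_neg h1]
    by_cases h2 : pvB_getSum n index maxSum ≤ maxSum
    · rw [if_pos h2]
      rw [pv_getSum_eq] at h2
      exact pv_good_unique n index maxSum _ _ hA
        ⟨by omega, le_rfl, Or.inl h2, fun w hw hwM => absurd hw (by omega)⟩
    · rw [if_neg h2]
      have hgen : ∀ e : Int, pvA_loop n index maxSum (maxSum - 1).toNat 1 maxSum =
          pvB_down n index maxSum
            ((pvB_up n index maxSum (maxSum - min (max e 1) maxSum).toNat (min (max e 1) maxSum) - 1).toNat)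
            (pvB_up n index maxSum (maxSum - min (max e 1) maxSum).toNat (min (max e 1) maxSum)) := by
        intro e
        have hv0 : 1 ≤ min (max e 1) maxSum ∧ min (max e 1) maxSum ≤ maxSum := by omega
        obtain ⟨hu1, huM, hupp⟩ := pv_up_post n index maxSum
          ((maxSum - min (max e 1) maxSum).toNat) (min (max e 1) maxSum) le_rfl hv0.1 hv0.2
        exact pv_good_unique n index maxSum _ _ hA
          (pv_down_good n index maxSum _ _ le_rfl hu1 huM hupp)
      exact hgen _

-- ===== VERDICT (by name: the statement is the Claim_ definition above) =====
theorem solution_function_name_spec : Claim_equal_solution_function_name := by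
  intro n index maxSum _
  exact pv_main n index maxSum
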